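-- pv_equiv track=rewrite | github.com/EbookFoundation/free-programming-books | venv/lib/python3.9/site-packages/pip/_vendor/idna/intranges.py | intranges_from_list
-- ===== SOURCE A (Python) =====
-- from typing import List, Tuple
--
-- def intranges_from_list(list_: List[int]) -> Tuple[int, ...]:
--     """Represent a list of integers as a sequence of ranges:
--     ((start_0, end_0), (start_1, end_1), ...), such that the original
--     integers are exactly those x such that start_i <= x < end_i for some i.
--
--     Ranges are encoded as single integers (start << 32 | end), not as tuples.
--     """
--
--     sorted_list = sorted(list_)
--     ranges = []
--     last_write = -1
--     for i in range(len(sorted_list)):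
--         if i + 1 < len(sorted_list):
--             if sorted_list[i] == sorted_list[i + 1] - 1:
--                 continue
--         current_range = sorted_list[last_write + 1 : i + 1]
--         ranges.append(_encode_range(current_range[0], current_range[-1] + 1))
--         last_write = i
--
--     return tuple(ranges)
--
-- def _encode_range(start: int, end: int) -> int:
--     return (start << 32) | end
-- ===== SOURCE B (Python) =====
-- from typing import List, Tuple
--
-- def intranges_from_list(list_: List[int]) -> Tuple[int, ...]:
--     """Represent a sorted copy of list_ as encoded ranges, by splitting it
--     into maximal runs of consecutive integers and encoding each run."""
--     return tuple(_encode_range(run[0], run[-1] + 1)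
--                  for run in _runs(sorted(list_)))
--
-- def _runs(xs: List[int]) -> List[List[int]]:
--     runs = []
--     i, n = 0, len(xs)
--     while i < n:
--         # start a new run, then extend it while the next element is prev + 1
--         run = [xs[i]]
--         i += 1
--         while i < n and xs[i] == run[-1] + 1:
--             run.append(xs[i])
--             i += 1
--         runs.append(run)
--     return runs
--
-- def _encode_range(start: int, end: int) -> int:
--     return (start << 32) | end
-- ===== Notes on version B (the rewrite author's own statement) =====
-- stated objective: alternative
-- what changed: A's single index loop with last_write bookkeeping and slicing is replaced by recursively splitting the sorted list into maximal consecutive runs and mapping the range encoder over the runs.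
import Mathlib
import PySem

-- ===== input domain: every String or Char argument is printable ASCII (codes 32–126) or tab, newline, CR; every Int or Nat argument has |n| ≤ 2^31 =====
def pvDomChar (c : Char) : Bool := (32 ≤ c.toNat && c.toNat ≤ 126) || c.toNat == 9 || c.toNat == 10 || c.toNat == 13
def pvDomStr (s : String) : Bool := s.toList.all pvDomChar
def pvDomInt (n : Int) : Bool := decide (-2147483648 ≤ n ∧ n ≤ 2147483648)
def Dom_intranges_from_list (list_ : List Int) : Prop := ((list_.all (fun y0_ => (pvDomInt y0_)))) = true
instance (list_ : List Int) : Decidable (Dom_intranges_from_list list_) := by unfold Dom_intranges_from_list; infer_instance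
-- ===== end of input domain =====

-- B replaces A's index loop (with last_write bookkeeping and slicing) by recursively
-- splitting the sorted list into maximal consecutive runs and mapping the encoder over
-- them — an alternative decomposition of the same O(n log n) task.


-- ===== PORT A =====
-- _encode_range(start, end) = (start << 32) | end  (shared helper of both sources)
def pvEncodeRange (start stop : Int) : Int := PySem.Int.bor (start <<< (32 : Nat)) stop

-- the body of A's for-loop: state = (ranges, last_write)
def pvEmitA (s : List Int) (st : List Int × Int) (i : Int) : List Int × Int :=
  let current_range := PySem.List.slice s (some (st.2 + 1)) (some (i + 1))
  (st.1 ++ [pvEncodeRange (PySem.List.pyGetD current_range 0 0)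
                          (PySem.List.pyGetD current_range (-1) 0 + 1)], i)

def pvBodyA (s : List Int) (st : List Int × Int) (i : Int) : List Int × Int :=
  if i + 1 < (s.length : Int) then
    if PySem.List.pyGetD s i 0 = PySem.List.pyGetD s (i + 1) 0 - 1 then st
    else pvEmitA s st i
  else pvEmitA s st i

def intranges_from_list (list_ : List Int) : List Int :=
  let sorted_list := PySem.List.sorted list_ id false
  ((PySem.List.pyRange 0 (sorted_list.length : Int) 1).foldl (pvBodyA sorted_list)
    ([], -1)).1

-- ===== PORT B =====
-- the while-loop of _runs: given the last element `prev` of the run so far, extend the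
-- run while the next element is prev+1; returns (extension of the run, rest)
def pvTakeRun (prev : Int) : List Int → List Int × List Int
  | [] => ([], [])
  | x :: xs =>
    if x = prev + 1 then
      let p := pvTakeRun x xs
      (x :: p.1, p.2)
    else ([], x :: xs)

theorem pvTakeRun_snd_length_le (prev : Int) (xs : List Int) :
    (pvTakeRun prev xs).2.length ≤ xs.length := by
  induction xs generalizing prev with
  | nil => simp [pvTakeRun]
  | cons x xs ih =>
    simp only [pvTakeRun]
    split
    · exact Nat.le_succ_of_le (ih x)
    · simp

-- _runs: split into maximal consecutive runs
def pvRuns : List Int → List (List Int)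
  | [] => []
  | x :: xs =>
    let p := pvTakeRun x xs
    (x :: p.1) :: pvRuns p.2
termination_by xs => xs.length
decreasing_by
  exact Nat.lt_succ_of_le (pvTakeRun_snd_length_le x xs)

def pvEncB (run : List Int) : Int :=
  pvEncodeRange (PySem.List.pyGetD run 0 0) (PySem.List.pyGetD run (-1) 0 + 1)

def intranges_from_list_alt (list_ : List Int) : List Int :=
  (pvRuns (PySem.List.sorted list_ id false)).map pvEncB

-- ===== PRECONDITION & SPEC =====
def Spec_intranges_from_list (list_ : List Int) (out : List Int) : Prop := out = intranges_from_list_alt list_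
instance (list_ : List Int) (out : List Int) : Decidable (Spec_intranges_from_list list_ out) := by unfold Spec_intranges_from_list; infer_instance

-- ===== CLAIM (what is proved, stated in full; the proofs are below) =====
def Claim_equal_intranges_from_list : Prop := ∀ (list_ : List Int), Dom_intranges_from_list list_ → Spec_intranges_from_list list_ (intranges_from_list list_)

-- ===== LEMMAS AND PROOFS =====

-- a fold whose body fixes every state over the listed elements is the identity
theorem pvFoldlId {σ : Type} (f : σ → Int → σ) (L : List Int) (init : σ)
    (h : ∀ i ∈ L, ∀ st, f st i = st) : L.foldl f init = init := by
  induction L generalizing init with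
  | nil => rfl
  | cons x xs ih => simp only [List.foldl_cons, h x (by simp)]; exact ih _ (fun i hi st => h i (by simp [hi]) st)

theorem pvTakeRun_append (prev : Int) (xs : List Int) :
    (pvTakeRun prev xs).1 ++ (pvTakeRun prev xs).2 = xs := by
  induction xs generalizing prev with
  | nil => simp [pvTakeRun]
  | cons x xs ih =>
    simp only [pvTakeRun]
    split
    · simpa using ih x
    · simp

theorem pvTakeRun_get (prev : Int) (xs : List Int) :
    ∀ (j : ℕ) (hj : j < (pvTakeRun prev xs).1.length),
      (pvTakeRun prev xs).1[j] = prev + 1 + (j : Int) := by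
  induction xs generalizing prev with
  | nil => simp [pvTakeRun]
  | cons x xs ih =>
    intro j hj
    by_cases hx : x = prev + 1
    · simp only [pvTakeRun, if_pos hx] at hj ⊢
      cases j with
      | zero => simpa using hx
      | succ j =>
        simp only [List.getElem_cons_succ]
        have := ih x j (by simpa using hj)
        rw [this]
        push_cast
        omega
    · simp only [pvTakeRun, if_neg hx] at hj
      simp at hj

theorem pvTakeRun_head_ne (prev : Int) (xs : List Int) (h : Int) (t : List Int)
    (hrest : (pvTakeRun prev xs).2 = h :: t) :
    h ≠ prev + ((pvTakeRun prev xs).1.length : Int) + 1 := by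
  induction xs generalizing prev with
  | nil => simp [pvTakeRun] at hrest
  | cons x xs ih =>
    by_cases hx : x = prev + 1
    · simp only [pvTakeRun, if_pos hx] at hrest ⊢
      have := ih x hrest
      simp only [List.length_cons]
      push_cast
      omega
    · simp only [pvTakeRun, if_neg hx] at hrest ⊢
      rw [List.cons.injEq] at hrest
      simp only [List.length_nil, Nat.cast_zero]
      omega

-- main invariant: starting at index a with last_write = a-1 and accumulated `acc`,
-- A's loop over indices [a, |s|) produces acc ++ the encodings of the runs of s.drop a
theorem pvMain (s : List Int) :
    ∀ (d a : ℕ) (acc : List Int), s.length - a = d → a ≤ s.length →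
    ((PySem.List.pyRange (a : Int) (s.length : Int) 1).foldl (pvBodyA s) (acc, (a : Int) - 1)).1
      = acc ++ (pvRuns (s.drop a)).map pvEncB := by
  intro d
  induction d using Nat.strong_induction_on with
  | _ d IH =>
  intro a acc hd ha
  by_cases hend : a = s.length
  · subst hend
    rw [PySem.List.pyRange_one_eq_nil (le_refl _), List.drop_length]
    simp [pvRuns]
  have halt : a < s.length := lt_of_le_of_ne ha hend
  obtain ⟨x, xs, hxxs⟩ : ∃ x xs, s.drop a = x :: xs := by
    cases h : s.drop a with
    | nil => exact absurd (congrArg List.length h) (by simp; omega)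
    | cons y ys => exact ⟨y, ys, rfl⟩
  obtain ⟨r, rest, htr⟩ : ∃ r rest, pvTakeRun x xs = (r, rest) := ⟨_, _, rfl⟩
  have hsplit : xs = r ++ rest := by
    have := pvTakeRun_append x xs; rw [htr] at this; exact this.symm
  have hrget : ∀ (j : ℕ) (hj : j < r.length), r[j] = x + 1 + (j : Int) := by
    intro j hj
    simpa [htr] using pvTakeRun_get x xs j (by simp [htr]; exact hj)
  set k : ℕ := r.length + 1 with hk
  have hlen : s.length = a + k + rest.length := by
    have h1 := congrArg List.length hxxs
    simp [hsplit] at h1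
    omega
  -- element values inside the run
  have helem : ∀ (m : ℕ), a ≤ m → m < a + k →
      s.getD m 0 = x + ((m : Int) - (a : Int)) := by
    intro m h1 h2
    rw [List.getD_eq_getElem?_getD, show m = a + (m - a) by omega, ← List.getElem?_drop, hxxs]
    cases hma : m - a with
    | zero => simp
    | succ j =>
      have hjr : j < r.length := by omega
      rw [List.getElem?_cons_succ, hsplit, List.getElem?_append_left hjr,
        List.getElem?_eq_getElem hjr, hrget j hjr]
      simp
      omega
  -- the same, through pyGetD at an Int index
  have hget : ∀ (i : Int), (a : Int) ≤ i → i < (a : Int) + (k : Int) →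
      PySem.List.pyGetD s i 0 = x + (i - (a : Int)) := by
    intro i hi1 hi2
    rw [show i = ((i.toNat : ℕ) : Int) by omega, PySem.List.pyGetD_natCast]
    rw [helem i.toNat (by omega) (by omega)]
  have hak : ((a : ℕ) : Int) + ((k : ℕ) : Int) ≤ ((s.length : ℕ) : Int) := by
    omega
  -- split the index range into run body, run end, and the remainder
  have hsplitR : PySem.List.pyRange (a : Int) (s.length : Int) 1
      = (PySem.List.pyRange (a : Int) ((a : Int) + (k : Int) - 1) 1
          ++ [(a : Int) + (k : Int) - 1])
          ++ PySem.List.pyRange ((a : Int) + (k : Int)) (s.length : Int) 1 := by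
    rw [← PySem.List.pyRange_one_singleton ((a : Int) + (k : Int) - 1)]
    rw [← PySem.List.pyRange_one_append (a : Int) ((a : Int) + (k : Int) - 1)
          ((a : Int) + (k : Int) - 1 + 1) (by omega) (by omega)]
    have : (a : Int) + (k : Int) - 1 + 1 = (a : Int) + (k : Int) := by ring
    rw [this]
    exact PySem.List.pyRange_one_append (a : Int) ((a : Int) + (k : Int))
      (s.length : Int) (by omega) hak
  rw [hsplitR, List.foldl_append, List.foldl_append]
  -- the first k-1 indices all hit `continue`
  have hid : (PySem.List.pyRange (a : Int) ((a : Int) + (k : Int) - 1) 1).foldl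
      (pvBodyA s) (acc, (a : Int) - 1) = (acc, (a : Int) - 1) := by
    apply pvFoldlId
    intro i hi st
    rw [PySem.List.mem_pyRange_one] at hi
    have hin : i + 1 < (s.length : Int) := by push_cast [hlen]; omega
    unfold pvBodyA
    rw [if_pos hin, if_pos]
    rw [hget i hi.1 (by omega), hget (i + 1) (by omega) (by omega)]
    ring
  rw [hid]
  -- at index a+k-1 the loop emits the run
  have hslice : PySem.List.slice s (some ((a : Int) - 1 + 1))
      (some ((a : Int) + (k : Int) - 1 + 1)) = x :: r := by
    have e1 : (a : Int) - 1 + 1 = ((a : ℕ) : Int) := by ring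
    have e2 : (a : Int) + (k : Int) - 1 + 1 = ((a : ℕ) : Int) + ((k : ℕ) : Int) := by ring
    rw [e1, e2, PySem.List.slice_natCast_add s a k, hxxs, hsplit]
    simp [hk]
  have hemit : pvEmitA s (acc, (a : Int) - 1) ((a : Int) + (k : Int) - 1)
      = (acc ++ [pvEncB (x :: r)], (a : Int) + (k : Int) - 1) := by
    unfold pvEmitA pvEncB
    simp only [hslice]
  have hstep : List.foldl (pvBodyA s) (acc, (a : Int) - 1) [(a : Int) + (k : Int) - 1]
      = (acc ++ [pvEncB (x :: r)], (a : Int) + (k : Int) - 1) := by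
    simp only [List.foldl_cons, List.foldl_nil]
    unfold pvBodyA
    by_cases hin : (a : Int) + (k : Int) - 1 + 1 < (s.length : Int)
    · rw [if_pos hin, if_neg, hemit]
      -- the run is maximal: the next element does not extend it
      obtain ⟨h, t, hht⟩ : ∃ h t, rest = h :: t := by
        cases hr2 : rest with
        | nil => exfalso; rw [hr2] at hlen; simp at hlen; push_cast [hlen] at hin; omega
        | cons y ys => exact ⟨y, ys, rfl⟩
      have hne : h ≠ x + (r.length : Int) + 1 := by
        have := pvTakeRun_head_ne x xs h t (by rw [htr]; exact hht)
        rw [htr] at this; exact this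
      have hnext : PySem.List.pyGetD s ((a : Int) + (k : Int) - 1 + 1) 0 = h := by
        have e : (a : Int) + (k : Int) - 1 + 1 = ((a + k : ℕ) : Int) := by push_cast; ring
        rw [e, PySem.List.pyGetD_natCast, List.getD_eq_getElem?_getD,
          ← List.getElem?_drop, hxxs]
        rw [show k = r.length + 1 from hk, List.getElem?_cons_succ, hsplit,
          List.getElem?_append_right (le_refl _)]
        simp [hht]
      rw [hget ((a : Int) + (k : Int) - 1) (by omega) (by omega), hnext]
      intro hcon
      apply hne
      push_cast [hk] at hcon ⊢
      omega
    · rw [if_neg hin, hemit]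
  rw [hstep]
  -- the remainder of the loop handles the remaining runs (induction hypothesis)
  have hrest_drop : s.drop (a + k) = rest := by
    have : s.drop (a + k) = (s.drop a).drop k := by rw [List.drop_drop]
    rw [this, hxxs]
    simp only [hk, List.drop_succ_cons, hsplit, List.drop_left]
  have hIH := IH (s.length - (a + k)) (by omega) (a + k) (acc ++ [pvEncB (x :: r)]) rfl (by omega)
  have e3 : ((a + k : ℕ) : Int) = (a : Int) + (k : Int) := by push_cast; ring
  rw [e3] at hIH
  rw [hIH, hrest_drop]
  have hruns : pvRuns (s.drop a) = (x :: r) :: pvRuns rest := by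
    rw [hxxs]
    conv_lhs => rw [pvRuns]
    simp [htr]
  rw [hruns]
  simp

-- ===== VERDICT (by name: the statement is the Claim_ definition above) =====
theorem intranges_from_list_spec : Claim_equal_intranges_from_list := by
  intro list_ _
  unfold Spec_intranges_from_list intranges_from_list intranges_from_list_alt
  simpa using pvMain (PySem.List.sorted list_ id false) _ 0 [] rfl (by simp)
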